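-- pv_equiv track=rewrite | github.com/LeeTosti/coding-temple | code_wars/reverse_fizzbuzz.py | reverse_fizz_buzz
-- ===== SOURCE A (Python) =====
-- def reverse_fizz_buzz(array):
--     fizz_val = 0
--     buzz_val = 0
--     fizzbuzz_val = 0
--     for i, val in enumerate(array):
--         if val == 'FizzBuzz':
--             fizzbuzz_val += i+1
--             break
--     for i, val in enumerate(array):
--         if val == 'Fizz':
--             fizz_val += i+1
--             break
--     for i, val in enumerate(array):
--         if val == 'Buzz':
--             buzz_val += i+1
--             break
--     if buzz_val > 0 and fizz_val > 0:
--         return (fizz_val, buzz_val)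
--     if fizz_val == 0 and buzz_val == 0:
--         return (fizzbuzz_val, fizzbuzz_val)
--     if buzz_val == 0:
--         return (fizz_val, fizzbuzz_val)
--     if fizz_val == 0:
--         return (fizzbuzz_val, buzz_val)
-- ===== SOURCE B (Python) =====
-- def reverse_fizz_buzz(array):
--     fb = fz = bz = None
--     for i, val in enumerate(array):
--         if fb is None and val == 'FizzBuzz':
--             fb = i + 1
--         if fz is None and val == 'Fizz':
--             fz = i + 1
--         if bz is None and val == 'Buzz':
--             bz = i + 1
--         if fb is not None and fz is not None and bz is not None:
--             break
--     fizzbuzz_val = 0 if fb is None else fb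
--     fizz_val = 0 if fz is None else fz
--     buzz_val = 0 if bz is None else bz
--     if buzz_val > 0 and fizz_val > 0:
--         return (fizz_val, buzz_val)
--     if fizz_val == 0 and buzz_val == 0:
--         return (fizzbuzz_val, fizzbuzz_val)
--     if buzz_val == 0:
--         return (fizz_val, fizzbuzz_val)
--     if fizz_val == 0:
--         return (fizzbuzz_val, buzz_val)
-- ===== Notes on version B (the rewrite author's own statement) =====
-- stated objective: alternative
-- what changed: replaces A's three separate early-exit scans of the array by a single pass with three first-seen holders (Option values set only once) plus an early break when all three are found; the final branch logic is unchanged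
import Mathlib
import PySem

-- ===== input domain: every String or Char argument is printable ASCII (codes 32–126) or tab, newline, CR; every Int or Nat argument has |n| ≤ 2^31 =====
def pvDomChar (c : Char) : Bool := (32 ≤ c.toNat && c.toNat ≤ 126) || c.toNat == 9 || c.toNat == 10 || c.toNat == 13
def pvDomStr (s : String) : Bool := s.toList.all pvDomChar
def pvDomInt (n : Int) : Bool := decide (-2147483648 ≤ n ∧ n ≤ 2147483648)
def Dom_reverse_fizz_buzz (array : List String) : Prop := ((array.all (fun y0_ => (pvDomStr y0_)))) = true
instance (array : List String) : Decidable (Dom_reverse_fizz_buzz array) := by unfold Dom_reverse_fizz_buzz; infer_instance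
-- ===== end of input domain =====

-- ===== PORT A =====
-- A: three separate early-exit scans (first match of each target, value i+1, else 0)
-- B: one pass with three first-seen Option holders and an early break; same final branches.
def scanFirst (l : List String) (t : String) (i : Int) : Int :=
  match l with
  | [] => 0
  | v :: rest => if v == t then i + 1 else scanFirst rest t (i + 1)

def reverse_fizz_buzz (array : List String) : Int × Int :=
  let fizzbuzz_val := scanFirst array "FizzBuzz" 0
  let fizz_val := scanFirst array "Fizz" 0
  let buzz_val := scanFirst array "Buzz" 0
  if buzz_val > 0 && fizz_val > 0 then (fizz_val, buzz_val)
  else if fizz_val == 0 && buzz_val == 0 then (fizzbuzz_val, fizzbuzz_val)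
  else if buzz_val == 0 then (fizz_val, fizzbuzz_val)
  else (fizzbuzz_val, buzz_val)  -- final 'if fizz_val == 0' branch; by the cases above it always fires here

-- ===== PORT B =====
def stepB (i : Int) (v : String) (s : Option Int × Option Int × Option Int) :
    Option Int × Option Int × Option Int :=
  (if s.1.isNone && v == "FizzBuzz" then some (i + 1) else s.1,
   if s.2.1.isNone && v == "Fizz" then some (i + 1) else s.2.1,
   if s.2.2.isNone && v == "Buzz" then some (i + 1) else s.2.2)

def loopB (l : List String) (i : Int) (s : Option Int × Option Int × Option Int) :
    Option Int × Option Int × Option Int :=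
  match l with
  | [] => s
  | v :: rest =>
    let s' := stepB i v s
    if s'.1.isSome && s'.2.1.isSome && s'.2.2.isSome then s' else loopB rest (i + 1) s'

def reverse_fizz_buzz_alt (array : List String) : Int × Int :=
  let s := loopB array 0 (none, none, none)
  let fizzbuzz_val := s.1.getD 0
  let fizz_val := s.2.1.getD 0
  let buzz_val := s.2.2.getD 0
  if buzz_val > 0 && fizz_val > 0 then (fizz_val, buzz_val)
  else if fizz_val == 0 && buzz_val == 0 then (fizzbuzz_val, fizzbuzz_val)
  else if buzz_val == 0 then (fizz_val, fizzbuzz_val)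
  else (fizzbuzz_val, buzz_val)

-- ===== PRECONDITION & SPEC =====
def Spec_reverse_fizz_buzz (array : List String) (out : Int × Int) : Prop := out = reverse_fizz_buzz_alt array
instance (array : List String) (out : Int × Int) : Decidable (Spec_reverse_fizz_buzz array out) := by unfold Spec_reverse_fizz_buzz; infer_instance

-- ===== CLAIM (what is proved, stated in full; the proofs are below) =====
def Claim_equal_reverse_fizz_buzz : Prop := ∀ (array : List String), Dom_reverse_fizz_buzz array → Spec_reverse_fizz_buzz array (reverse_fizz_buzz array)

-- ===== LEMMAS AND PROOFS =====
def optScan (l : List String) (t : String) (i : Int) : Option Int :=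
  match l with
  | [] => none
  | v :: rest => if v == t then some (i + 1) else optScan rest t (i + 1)

def oelse : Option Int → Option Int → Option Int
  | some a, _ => some a
  | none, b => b

theorem scanFirst_eq_optScan (l : List String) (t : String) (i : Int) :
    scanFirst l t i = (optScan l t i).getD 0 := by
  induction l generalizing i with
  | nil => rfl
  | cons v rest ih =>
    simp only [scanFirst, optScan]
    split_ifs <;> simp [ih]

theorem loopB_eq (l : List String) (i : Int) (s : Option Int × Option Int × Option Int) :
    loopB l i s = (oelse s.1 (optScan l "FizzBuzz" i),
                   oelse s.2.1 (optScan l "Fizz" i),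
                   oelse s.2.2 (optScan l "Buzz" i)) := by
  induction l generalizing i s with
  | nil => cases s with | mk a s2 => cases s2 with | mk b c =>
             cases a <;> cases b <;> cases c <;> rfl
  | cons v rest ih =>
    obtain ⟨a, b, c⟩ := s
    simp only [loopB, stepB, optScan]
    split
    · rename_i h
      cases a <;> cases b <;> cases c <;>
        simp_all [oelse] <;> split_ifs <;> simp_all [oelse]
    · rw [ih]
      cases a <;> cases b <;> cases c <;>
        simp_all [oelse] <;> split_ifs <;> simp_all [oelse]

-- ===== VERDICT =====
theorem reverse_fizz_buzz_spec : Claim_equal_reverse_fizz_buzz := by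
  intro array _
  unfold Spec_reverse_fizz_buzz reverse_fizz_buzz reverse_fizz_buzz_alt
  rw [loopB_eq]
  simp only [oelse, scanFirst_eq_optScan]
  rfl
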